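-- pv_equiv track=rewrite | github.com/elifesciences/sciencebeam-trainer-grobid-tools | sciencebeam_trainer_grobid_tools/utils/fuzzy.py | split_with_offset
-- ===== SOURCE A (Python) =====
-- def split_with_offset(s: str, sep: str, include_separators: bool = True):
--     previous_start = 0
--     tokens = []
--     for i, c in enumerate(s):
--         if c in sep:
--             if previous_start < i:
--                 tokens.append((previous_start, s[previous_start:i]))
--             if include_separators:
--                 tokens.append((i, c))
--             previous_start = i + 1
--     if previous_start < len(s):
--         tokens.append((previous_start, s[previous_start:]))
--     return tokens
-- ===== SOURCE B (Python) =====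
-- import re
--
--
-- def split_with_offset(s: str, sep: str, include_separators: bool = True):
--     # Regex tokenizer: find all separator positions at once, then emit the
--     # pieces between consecutive separator positions (no running state).
--     if not sep:
--         return [(0, s)] if s else []
--     pattern = '|'.join(re.escape(ch) for ch in sep)
--     matches = [(m.start(), m.group()) for m in re.finditer(pattern, s)]
--     n = len(s)
--     tokens = []
--     for (p, _), (q, c) in zip([(-1, '')] + matches, matches + [(n, '')]):
--         if p + 1 < q:
--             tokens.append((p + 1, s[p + 1:q]))
--         if include_separators and q < n:
--             tokens.append((q, c))
--     return tokens
-- ===== Notes on version B (the rewrite author's own statement) =====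
-- stated objective: idiomatic
-- what changed: Replaces the stateful per-character loop (previous_start accumulator mutated inside the scan) with a regex pass that collects all separator positions up front and then emits tokens pairwise between consecutive boundaries via zip, with the empty-sep case handled up front.
import Mathlib
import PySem

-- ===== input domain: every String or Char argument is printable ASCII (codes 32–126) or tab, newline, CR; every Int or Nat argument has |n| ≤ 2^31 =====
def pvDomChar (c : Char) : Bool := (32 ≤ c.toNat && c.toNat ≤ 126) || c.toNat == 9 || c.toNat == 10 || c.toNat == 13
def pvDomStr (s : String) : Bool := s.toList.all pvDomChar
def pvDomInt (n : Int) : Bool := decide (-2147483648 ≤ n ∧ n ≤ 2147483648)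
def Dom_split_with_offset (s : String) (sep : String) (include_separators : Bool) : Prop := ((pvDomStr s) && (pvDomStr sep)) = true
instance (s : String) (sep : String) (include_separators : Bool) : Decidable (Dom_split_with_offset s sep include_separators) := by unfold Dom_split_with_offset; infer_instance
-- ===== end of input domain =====

-- B replaces A's stateful per-character scan by a "collect all separator positions,
-- then emit tokens pairwise between consecutive boundaries" pass (idiomatic rewrite, same cost).


-- ===== PORT A =====
-- 'c in sep' for a single character c is character membership in sep's characters.
def split_with_offset (s : String) (sep : String) (include_separators : Bool) : List (Int × String) :=
  let st := (PySem.List.enumerate s.toList).foldl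
    (fun (st : Int × List (Int × String)) ic =>
      if sep.toList.contains ic.2 then
        let t := if st.1 < ic.1 then st.2 ++ [(st.1, PySem.Str.slice s (some st.1) (some ic.1))] else st.2
        let t := if include_separators then t ++ [(ic.1, String.ofList [ic.2])] else t
        (ic.1 + 1, t)
      else st) ((0 : Int), [])
  if st.1 < (s.toList.length : Int) then
    st.2 ++ [(st.1, PySem.Str.slice s (some st.1) none)]
  else st.2

-- ===== PORT B =====
-- re.finditer over the alternation of sep's (escaped) characters matches exactly the
-- positions i with s[i] in sep, in order; ported as filtering the enumeration.
def split_with_offset_alt (s : String) (sep : String) (include_separators : Bool) : List (Int × String) :=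
  if sep = "" then (if s = "" then [] else [((0 : Int), s)]) else
  let ms : List (Int × String) :=
    ((PySem.List.enumerate s.toList).filter (fun ic => sep.toList.contains ic.2)).map
      (fun ic => (ic.1, String.ofList [ic.2]))
  let n : Int := s.toList.length
  (List.zip (((-1 : Int), "") :: ms) (ms ++ [(n, "")])).flatMap
    (fun pq =>
      (if pq.1.1 + 1 < pq.2.1 then
        [(pq.1.1 + 1, PySem.Str.slice s (some (pq.1.1 + 1)) (some pq.2.1))] else []) ++
      (if include_separators && decide (pq.2.1 < n) then [(pq.2.1, pq.2.2)] else []))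

-- ===== PRECONDITION & SPEC =====
def Spec_split_with_offset (s : String) (sep : String) (include_separators : Bool) (out : List (Int × String)) : Prop := out = split_with_offset_alt s sep include_separators
instance (s : String) (sep : String) (include_separators : Bool) (out : List (Int × String)) : Decidable (Spec_split_with_offset s sep include_separators out) := by unfold Spec_split_with_offset; infer_instance

-- ===== CLAIM (what is proved, stated in full; the proofs are below) =====
def Claim_equal_split_with_offset : Prop := ∀ (s : String) (sep : String) (include_separators : Bool), Dom_split_with_offset s sep include_separators → Spec_split_with_offset s sep include_separators (split_with_offset s sep include_separators)

-- ===== LEMMAS AND PROOFS =====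

-- A's loop body and finalization, named so the invariant lemma can rewrite step by step
def pvBody (s sep : String) (inc : Bool) (st : Int × List (Int × String)) (ic : Int × Char) :
    Int × List (Int × String) :=
  if sep.toList.contains ic.2 then
    let t := if st.1 < ic.1 then st.2 ++ [(st.1, PySem.Str.slice s (some st.1) (some ic.1))] else st.2
    let t := if inc then t ++ [(ic.1, String.ofList [ic.2])] else t
    (ic.1 + 1, t)
  else st

def pvFin (s : String) (st : Int × List (Int × String)) : List (Int × String) :=
  if st.1 < (s.toList.length : Int) then
    st.2 ++ [(st.1, PySem.Str.slice s (some st.1) none)]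
  else st.2

theorem pvBody_pos (s sep : String) (inc : Bool) (st : Int × List (Int × String)) (i : Int) (c : Char)
    (hc : sep.toList.contains c = true) :
    pvBody s sep inc st (i, c) =
      (i + 1, (if st.1 < i then st.2 ++ [(st.1, PySem.Str.slice s (some st.1) (some i))] else st.2)
                ++ (if inc then [(i, String.ofList [c])] else [])) := by
  simp only [pvBody, hc]
  cases inc <;> simp

theorem pvBody_neg (s sep : String) (inc : Bool) (st : Int × List (Int × String)) (ic : Int × Char)
    (hc : sep.toList.contains ic.2 = false) : pvBody s sep inc st ic = st := by
  simp only [pvBody, hc]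
  simp

-- common shape both sides are reduced to: tokens emitted between consecutive boundaries
def pvH (s : String) (inc : Bool) (n : Int) : Int → List (Int × String) → List (Int × String)
  | prev, [] => if prev < n then [(prev, PySem.Str.slice s (some prev) (some n))] else []
  | prev, (q, cs) :: ms =>
      (if prev < q then [(prev, PySem.Str.slice s (some prev) (some q))] else []) ++
      (if inc then [(q, cs)] else []) ++ pvH s inc n (q + 1) ms

theorem pvSlice_none_eq (s : String) (a : Int) (h0 : 0 ≤ a) :
    PySem.Str.slice s (some a) none = PySem.Str.slice s (some a) (some (s.toList.length : Int)) := by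
  apply String.toList_inj.mp
  simp only [PySem.Str.toList_slice, PySem.Chars.slice_eq_listSlice]
  rw [PySem.List.slice_from _ h0, PySem.List.slice_toNat _ h0 (by positivity)]
  rw [Int.toNat_natCast]
  exact (List.take_of_length_le (by simp)).symm

-- A's scan, generalized over the suffix being processed
theorem pvA_run (s sep : String) (inc : Bool) :
    ∀ (l : List Char) (k : Nat) (prev : Int) (toks : List (Int × String)),
    0 ≤ prev → prev ≤ (k : Int) → k + l.length = s.toList.length →
    pvFin s ((PySem.List.enumerate l (k : Int)).foldl (pvBody s sep inc) (prev, toks))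
    = toks ++ pvH s inc (s.toList.length : Int) prev
        (((PySem.List.enumerate l (k : Int)).filter (fun ic => sep.toList.contains ic.2)).map
          (fun ic => (ic.1, String.ofList [ic.2]))) := by
  intro l
  induction l with
  | nil =>
      intro k prev toks h0 _ _
      simp only [PySem.List.enumerate_nil, List.foldl_nil, List.filter_nil, List.map_nil, pvH, pvFin]
      rw [pvSlice_none_eq s prev h0]
      split_ifs <;> simp
  | cons c l ih =>
      intro k prev toks h0 hk hn
      rw [PySem.List.enumerate_cons]
      simp only [List.foldl_cons]
      by_cases hc : sep.toList.contains c
      · rw [pvBody_pos s sep inc _ _ _ hc]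
        rw [List.filter_cons_of_pos (by simpa using hc), List.map_cons]
        have hcast : ((k : Int) + 1) = ((k + 1 : Nat) : Int) := by push_cast; ring
        rw [hcast, ih (k + 1) _ _ (by positivity) (by push_cast; omega) (by simp at hn ⊢; omega)]
        simp only [pvH, ← hcast]
        split_ifs <;> simp [List.append_assoc]
      · rw [pvBody_neg s sep inc _ _ (by simpa using hc)]
        rw [List.filter_cons_of_neg (by simpa using hc)]
        have hcast : ((k : Int) + 1) = ((k + 1 : Nat) : Int) := by push_cast; ring
        rw [hcast]
        exact ih (k + 1) prev toks h0 (by push_cast at hk ⊢; omega) (by simp at hn ⊢; omega)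

-- B's pairwise emission over zipped boundaries
theorem pvB_run (s : String) (inc : Bool) :
    ∀ (ms : List (Int × String)) (p : Int) (cs : String),
    (∀ x ∈ ms, x.1 < (s.toList.length : Int)) →
    (List.zip ((p, cs) :: ms) (ms ++ [((s.toList.length : Int), "")])).flatMap
      (fun pq =>
        (if pq.1.1 + 1 < pq.2.1 then
          [(pq.1.1 + 1, PySem.Str.slice s (some (pq.1.1 + 1)) (some pq.2.1))] else []) ++
        (if inc && decide (pq.2.1 < (s.toList.length : Int)) then [(pq.2.1, pq.2.2)] else []))
    = pvH s inc (s.toList.length : Int) (p + 1) ms := by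
  intro ms
  induction ms with
  | nil =>
      intro p cs _
      simp [pvH]
  | cons qc ms ih =>
      intro p cs hms
      obtain ⟨q, c⟩ := qc
      have hq : q < (s.toList.length : Int) := hms (q, c) (by simp)
      simp only [List.cons_append, List.zip_cons_cons, List.flatMap_cons]
      rw [ih q c (fun x hx => hms x (by simp [hx]))]
      simp only [pvH, hq, decide_true]
      cases inc <;> simp [List.append_assoc]

theorem pvEmpty_sep (s : String) (inc : Bool) :
    split_with_offset s "" inc = split_with_offset_alt s "" inc := by
  unfold split_with_offset split_with_offset_alt
  have hfold : ∀ (l : List (Int × Char)) (st : Int × List (Int × String)),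
      l.foldl (fun (st : Int × List (Int × String)) ic =>
        if ("" : String).toList.contains ic.2 then
          let t := if st.1 < ic.1 then st.2 ++ [(st.1, PySem.Str.slice s (some st.1) (some ic.1))] else st.2
          let t := if inc then t ++ [(ic.1, String.ofList [ic.2])] else t
          (ic.1 + 1, t)
        else st) st = st := by
    intro l
    induction l with
    | nil => intro st; rfl
    | cons x l ih => intro st; simp
  simp only [hfold]
  by_cases hs : s = ""
  · subst hs; simp
  · have hlen : 0 < s.toList.length := by
      cases h : s.toList with
      | nil => exact absurd (by simpa using String.toList_inj.mp (by simp [h]) : s = "") hs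
      | cons a t => simp
    simp only [if_neg hs, if_pos (show (0 : Int) < (s.toList.length : Int) by exact_mod_cast hlen)]
    have h0 : PySem.Str.slice s (some 0) none = s := by
      apply String.toList_inj.mp
      simp only [PySem.Str.toList_slice, PySem.Chars.slice_eq_listSlice]
      rw [PySem.List.slice_from _ le_rfl]
      simp
    simp [h0]

-- ===== VERDICT (by name: the statement is the Claim_ definition above) =====
theorem split_with_offset_spec : Claim_equal_split_with_offset := by
  intro s sep inc _
  unfold Spec_split_with_offset
  by_cases hsep : sep = ""
  · subst hsep; exact pvEmpty_sep s inc
  · have hrepr : split_with_offset s sep inc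
        = pvFin s ((PySem.List.enumerate s.toList ((0 : Nat) : Int)).foldl (pvBody s sep inc) ((0 : Int), [])) := rfl
    rw [hrepr, pvA_run s sep inc s.toList 0 0 [] le_rfl le_rfl (by simp)]
    have hB := pvB_run s inc
      (((PySem.List.enumerate s.toList ((0 : Nat) : Int)).filter (fun ic => sep.toList.contains ic.2)).map
        (fun ic => (ic.1, String.ofList [ic.2]))) (-1) ""
      (by
        intro x hx
        simp only [List.mem_map, List.mem_filter] at hx
        obtain ⟨ic, ⟨hmem, _⟩, rfl⟩ := hx
        rw [PySem.List.mem_enumerate_iff] at hmem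
        obtain ⟨k, hk, rfl⟩ := hmem
        simp only [Nat.cast_zero, zero_add]
        exact_mod_cast hk)
    unfold split_with_offset_alt
    rw [if_neg hsep]
    simp only [Nat.cast_zero] at hB ⊢
    rw [hB]
    norm_num
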